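-- pv_equiv track=rewrite | github.com/qodo-ai/pr-agent | pr_agent/config_loader.py | _strip_json_trailing_commas
-- ===== SOURCE A (Python) =====
-- def _strip_json_trailing_commas(content: str) -> str:
--     """Strip trailing commas outside strings so common JSONC files can be parsed."""
--     stripped = []
--     in_string = False
--     is_escaped = False
--     index = 0
--
--     while index < len(content):
--         char = content[index]
--
--         if in_string:
--             stripped.append(char)
--             if is_escaped:
--                 is_escaped = False
--             elif char == "\\":
--                 is_escaped = True
--             elif char == '"':
--                 in_string = False
--             index += 1
--             continue
--
--         if char == '"':
--             in_string = True
--             stripped.append(char)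
--             index += 1
--             continue
--
--         if char == ",":
--             lookahead = index + 1
--             while lookahead < len(content) and content[lookahead] in {" ", "\t", "\r", "\n"}:
--                 lookahead += 1
--             if lookahead < len(content) and content[lookahead] in {"]", "}"}:
--                 index += 1
--                 continue
--
--         stripped.append(char)
--         index += 1
--
--     return "".join(stripped)
-- ===== SOURCE B (Python) =====
-- def _strip_json_trailing_commas(content: str) -> str:
--     """Strip trailing commas outside strings so common JSONC files can be parsed."""
--     out = []
--     in_string = False
--     escaped = False
--     pending = False   # a comma is buffered, waiting for the next non-space char
--     ws = []           # whitespace buffered after the pending comma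
--     for char in content:
--         if in_string:
--             out.append(char)
--             if escaped:
--                 escaped = False
--             elif char == "\\":
--                 escaped = True
--             elif char == '"':
--                 in_string = False
--         elif pending:
--             if char in " \t\r\n":
--                 ws.append(char)
--             elif char in "]}":
--                 out.extend(ws)
--                 out.append(char)
--                 pending = False
--                 ws = []
--             elif char == ",":
--                 out.append(",")
--                 out.extend(ws)
--                 ws = []
--             else:
--                 out.append(",")
--                 out.extend(ws)
--                 out.append(char)
--                 pending = False
--                 ws = []
--                 if char == '"':
--                     in_string = True
--         elif char == ",":
--             pending = True
--         elif char == '"':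
--             in_string = True
--             out.append(char)
--         else:
--             out.append(char)
--     if pending:
--         out.append(",")
--         out.extend(ws)
--     return "".join(out)
-- ===== Notes on version B (the rewrite author's own statement) =====
-- stated objective: faster
-- what changed: Replaces A's per-comma whitespace lookahead rescan with a single pass that buffers the pending comma plus following whitespace and decides once at the next non-space character.
import Mathlib
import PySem

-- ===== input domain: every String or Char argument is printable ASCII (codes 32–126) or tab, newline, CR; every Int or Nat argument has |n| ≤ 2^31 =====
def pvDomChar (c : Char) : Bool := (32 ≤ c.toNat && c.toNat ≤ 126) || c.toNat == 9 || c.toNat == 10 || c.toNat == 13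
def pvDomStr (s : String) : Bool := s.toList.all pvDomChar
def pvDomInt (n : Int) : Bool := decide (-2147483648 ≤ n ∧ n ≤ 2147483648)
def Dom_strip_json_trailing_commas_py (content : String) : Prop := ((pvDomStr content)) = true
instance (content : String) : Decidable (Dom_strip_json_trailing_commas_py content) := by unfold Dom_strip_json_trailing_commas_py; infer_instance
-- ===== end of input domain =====

-- B replaces A's re-scan of the whitespace run after every comma (lookahead loop) by a single
-- pass that buffers the pending comma and following whitespace, deciding once at the next
-- non-space character (objective: faster, asymptotic O(n) vs O(n·w)).

def pvIsWs (c : Char) : Bool := c = ' ' || c = '\t' || c = '\r' || c = '\n'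
def pvIsClose (c : Char) : Bool := c = ']' || c = '}'

-- ===== PORT A =====
-- inner lookahead loop of A: skip the whitespace run
def pvSkipWs : List Char → List Char
  | [] => []
  | c :: r => if pvIsWs c then pvSkipWs r else c :: r

-- A's while-loop, state (in_string, is_escaped), consuming the remaining characters
def pvGoA : Bool → Bool → List Char → List Char
  | _, _, [] => []
  | true, e, c :: r =>
      c :: (if e then pvGoA true false r
            else if c = '\\' then pvGoA true true r
            else if c = '"' then pvGoA false e r
            else pvGoA true e r)
  | false, e, c :: r =>
      if c = '"' then c :: pvGoA true e r
      else if c = ',' then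
        (match pvSkipWs r with
         | [] => c :: pvGoA false e r
         | d :: _ => if pvIsClose d then pvGoA false e r else c :: pvGoA false e r)
      else c :: pvGoA false e r

def strip_json_trailing_commas_py (content : String) : String :=
  String.mk (pvGoA false false content.toList)

-- ===== PORT B =====
-- B's single-pass loop: pvGoB is the non-pending state (in_string, escaped),
-- pvGoBp is the pending state (escaped, buffered whitespace ws, rest)
mutual
def pvGoB : Bool → Bool → List Char → List Char
  | _, _, [] => []
  | true, e, c :: r =>
      c :: (if e then pvGoB true false r
            else if c = '\\' then pvGoB true true r
            else if c = '"' then pvGoB false e r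
            else pvGoB true e r)
  | false, e, c :: r =>
      if c = ',' then pvGoBp e [] r
      else if c = '"' then c :: pvGoB true e r
      else c :: pvGoB false e r
termination_by _ _ l => l.length
decreasing_by all_goals simp

def pvGoBp : Bool → List Char → List Char → List Char
  | _, ws, [] => ',' :: ws
  | e, ws, c :: r =>
      if pvIsWs c then pvGoBp e (ws ++ [c]) r
      else if pvIsClose c then ws ++ c :: pvGoB false e r
      else if c = ',' then ',' :: (ws ++ pvGoBp e [] r)
      else ',' :: (ws ++ (c :: (if c = '"' then pvGoB true e r else pvGoB false e r)))
termination_by _ _ l => l.length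
decreasing_by all_goals simp
end

def strip_json_trailing_commas_py_alt (content : String) : String :=
  String.mk (pvGoB false false content.toList)

-- ===== PRECONDITION & SPEC =====
def Spec_strip_json_trailing_commas_py (content : String) (out : String) : Prop := out = strip_json_trailing_commas_py_alt content
instance (content : String) (out : String) : Decidable (Spec_strip_json_trailing_commas_py content out) := by unfold Spec_strip_json_trailing_commas_py; infer_instance

-- ===== CLAIM (what is proved, stated in full; the proofs are below) =====
def Claim_equal_strip_json_trailing_commas_py : Prop := ∀ (content : String), Dom_strip_json_trailing_commas_py content → Spec_strip_json_trailing_commas_py content (strip_json_trailing_commas_py content)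

-- ===== LEMMAS AND PROOFS =====

-- what the pending state of B is worth, expressed through A's loop
def pvPendingSpec (e : Bool) (ws l : List Char) : List Char :=
  match pvSkipWs l with
  | [] => ',' :: (ws ++ pvGoA false e l)
  | d :: _ => if pvIsClose d then ws ++ pvGoA false e l else ',' :: (ws ++ pvGoA false e l)

lemma pvMain : ∀ n l, List.length l ≤ n →
    ((∀ e : Bool, pvGoA true e l = pvGoB true e l) ∧
     (∀ e : Bool, pvGoA false e l = pvGoB false e l) ∧
     (∀ (e : Bool) (ws : List Char), pvGoBp e ws l = pvPendingSpec e ws l)) := by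
  intro n
  induction n with
  | zero =>
      intro l hl
      have : l = [] := by
        cases l with
        | nil => rfl
        | cons c r => simp at hl
      subst this
      refine ⟨?_, ?_, ?_⟩ <;> intro e <;> simp [pvGoA, pvGoB, pvGoBp, pvPendingSpec, pvSkipWs]
  | succ n ih =>
      intro l hl
      cases l with
      | nil =>
          refine ⟨?_, ?_, ?_⟩ <;> intro e <;>
            simp [pvGoA, pvGoB, pvGoBp, pvPendingSpec, pvSkipWs]
      | cons c r =>
          have hr : List.length r ≤ n := by simp at hl; omega
          obtain ⟨ihT, ihF, ihP⟩ := ih r hr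
          refine ⟨?_, ?_, ?_⟩
          · -- in-string state: identical code on both sides
            intro e
            simp only [pvGoA, pvGoB]
            by_cases he : e = true
            · subst he; simp [ihT]
            · have : e = false := by cases e <;> simp_all
              subst this
              by_cases h1 : c = '\\'
              · simp [h1, ihT]
              · by_cases h2 : c = '"'
                · simp [h1, h2, ihF]
                · simp [h1, h2, ihT]
          · -- non-pending outside-string state
            intro e
            by_cases h2 : c = '"'
            · subst h2; simp [pvGoA, pvGoB, ihT]
            · by_cases h1 : c = ','
              · subst h1
                simp only [pvGoA, pvGoB, if_neg (by decide : ¬ (',' = '"')), if_pos rfl]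
                rw [ihP e []]
                simp only [pvPendingSpec, List.nil_append]
                cases hsk : pvSkipWs r with
                | nil => simp [ihF]
                | cons d t => by_cases hcl : pvIsClose d = true <;> simp [hcl, ihF]
              · simp [pvGoA, pvGoB, h1, h2, ihF]
          · -- pending state vs its specification
            intro e ws
            by_cases hw : pvIsWs c = true
            · have h2 : c ≠ '"' := by intro hEq; rw [hEq] at hw; exact absurd hw (by decide)
              have h1 : c ≠ ',' := by intro hEq; rw [hEq] at hw; exact absurd hw (by decide)
              simp only [pvGoBp, hw, if_true]
              rw [ihP e (ws ++ [c])]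
              simp only [pvPendingSpec, pvSkipWs, hw, if_true]
              have hA : pvGoA false e (c :: r) = c :: pvGoA false e r := by
                simp [pvGoA, h1, h2]
              rw [hA]
              cases hsk : pvSkipWs r with
              | nil => simp
              | cons d t => by_cases hcl : pvIsClose d = true <;> simp [hcl]
            · have hwf : pvIsWs c = false := by revert hw; cases pvIsWs c <;> simp
              by_cases hcl : pvIsClose c = true
              · have h2 : c ≠ '"' := by intro hEq; rw [hEq] at hcl; exact absurd hcl (by decide)
                have h1 : c ≠ ',' := by intro hEq; rw [hEq] at hcl; exact absurd hcl (by decide)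
                simp only [pvGoBp, hwf, hcl, Bool.false_eq_true, if_false, if_true]
                simp only [pvPendingSpec, pvSkipWs, hwf, Bool.false_eq_true, if_false, hcl, if_true]
                simp [pvGoA, h1, h2, ihF]
              · have hclf : pvIsClose c = false := by revert hcl; cases pvIsClose c <;> simp
                by_cases h1 : c = ','
                · subst h1
                  simp only [pvGoBp, hwf, hclf, Bool.false_eq_true, if_false, if_pos rfl]
                  rw [ihP e []]
                  simp only [pvPendingSpec, pvSkipWs, hwf, hclf, Bool.false_eq_true, if_false,
                    List.nil_append]
                  have hA : pvGoA false e (',' :: r) =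
                      (match pvSkipWs r with
                       | [] => ',' :: pvGoA false e r
                       | d :: _ => if pvIsClose d then pvGoA false e r else ',' :: pvGoA false e r) := by
                    simp [pvGoA]
                  rw [hA]
                  cases hsk : pvSkipWs r with
                  | nil => simp
                  | cons d t => by_cases hd : pvIsClose d = true <;> simp [hd]
                · -- ordinary character (possibly a quote): flush comma+ws, emit c
                  simp only [pvGoBp, hwf, hclf, Bool.false_eq_true, if_false, if_neg h1]
                  simp only [pvPendingSpec, pvSkipWs, hwf, hclf, Bool.false_eq_true, if_false,
                    if_neg h1]
                  by_cases h2 : c = '"'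
                  · subst h2; simp [pvGoA, ihT]
                  · simp [pvGoA, h1, h2, ihF]

-- ===== VERDICT (by name: the statement is the Claim_ definition above) =====
theorem strip_json_trailing_commas_py_spec : Claim_equal_strip_json_trailing_commas_py := by
  intro content _
  unfold Spec_strip_json_trailing_commas_py strip_json_trailing_commas_py strip_json_trailing_commas_py_alt
  have h := (pvMain (List.length content.toList) content.toList le_rfl).2.1 false
  rw [h]
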